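-- pv_equiv track=rewrite | github.com/T0nyX1ang/noqx | solvers/tapa.py | parse_shading
-- ===== SOURCE A (Python) =====
-- from typing import List
--
-- def parse_shading(shading: List[str]):
--     """
--     Returns the Tapa clue that a ring of 8 cells corresponds to, digits sorted in increasing order.
--     For example, shading = [T,F,T,T,T,F,F,T] should output [2, 3].
--     As a special case, outputs [0] if shading is all False.
--     """
--     if all(shading):  # shading is all True
--         return [8]
--
--     # rotate so that the first spot is False
--     idx = shading.index(False)
--     shading = shading[idx:] + shading[:idx]
--
--     # now `clue` is the lengths of consecutive runs of `True` in shading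
--     clue = []
--     curr_num = 0
--     for b in shading:
--         if b:  # shaded, add to shaded string
--             curr_num += 1
--         else:  # unshaded, end current shaded string
--             if curr_num > 0:
--                 clue.append(curr_num)
--             curr_num = 0
--     if curr_num > 0:  # add last string
--         clue.append(curr_num)
--
--     if not clue:
--         clue = [0]
--     return sorted(clue)
-- ===== SOURCE B (Python) =====
-- from typing import List
--
-- def parse_shading(shading: List[str]):
--     """Tapa clue for a ring of 8 cells: single pass collecting run lengths (zeros
--     included at every unshaded cell), then a circular wrap-merge instead of rotating."""
--     if all(shading):  # shading is all True
--         return [8]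
--
--     runs = []
--     n = 0
--     for b in shading:
--         if b:
--             n += 1
--         else:
--             runs.append(n)  # flush current run length (may be 0)
--             n = 0
--     # n is now the length of the trailing run of True cells
--     if n and shading[0]:
--         runs[0] += n        # ring wraps: trailing run joins the leading run
--     elif n:
--         runs.append(n)
--     runs = [r for r in runs if r] or [0]
--     return sorted(runs)
-- ===== Notes on version B (the rewrite author's own statement) =====
-- stated objective: alternative
-- what changed: Instead of rotating the list to start at the first False and then collecting positive runs, B collects run lengths (zeros included) in one pass over the original list and handles the circular wrap by merging the trailing True-run into the leading one, filtering out zero runs at the end.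
import Mathlib
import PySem

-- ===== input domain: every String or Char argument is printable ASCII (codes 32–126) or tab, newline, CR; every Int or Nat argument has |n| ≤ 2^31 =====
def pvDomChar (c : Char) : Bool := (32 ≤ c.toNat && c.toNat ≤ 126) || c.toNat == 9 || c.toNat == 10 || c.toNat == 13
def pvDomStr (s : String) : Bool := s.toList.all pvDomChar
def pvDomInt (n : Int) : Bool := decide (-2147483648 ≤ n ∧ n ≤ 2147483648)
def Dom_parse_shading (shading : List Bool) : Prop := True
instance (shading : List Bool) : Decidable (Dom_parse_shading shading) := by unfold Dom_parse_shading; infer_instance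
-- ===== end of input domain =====

-- B replaces A's rotate-then-scan by a single scan plus a circular wrap-merge (objective: alternative, same cost).

-- ===== PORT A =====
-- the loop body of A ("if b: curr_num += 1 else: flush if positive")
def stepA (st : List Int × Int) (b : Bool) : List Int × Int :=
  if b then (st.1, st.2 + 1)
  else (if st.2 > 0 then (st.1 ++ [st.2], 0) else (st.1, 0))

def parse_shading (shading : List Bool) : List Int :=
  if shading.all (fun b => b) then [8]
  else
    match PySem.List.index? shading false with
    | none => []  -- unreachable: the guard ensures False ∈ shading
    | some idx =>
      let shading2 := PySem.List.slice shading (some (idx : Int)) none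
                        ++ PySem.List.slice shading none (some (idx : Int))
      let st := shading2.foldl stepA ([], 0)
      let clue := if st.2 > 0 then st.1 ++ [st.2] else st.1
      let clue := if clue = [] then [0] else clue
      PySem.List.sorted clue (fun x => x) false

-- ===== PORT B =====
-- the loop body of B ("if b: n += 1 else: runs.append(n); n = 0")
def stepB (st : List Int × Int) (b : Bool) : List Int × Int :=
  if b then (st.1, st.2 + 1) else (st.1 ++ [st.2], 0)

def parse_shading_alt (shading : List Bool) : List Int :=
  if shading.all (fun b => b) then [8]
  else
    let st := shading.foldl stepB ([], 0)
    let n := st.2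
    let runs :=
      if n ≠ 0 && shading.headD false then   -- Python `n and shading[0]`: shading[0] only reached when n ≠ 0, so the list is nonempty
        match st.1 with
        | r0 :: rest => (r0 + n) :: rest     -- runs[0] += n
        | [] => [n]                          -- unreachable: a False exists, so at least one run was flushed
      else if n ≠ 0 then st.1 ++ [n]
      else st.1
    let runs := runs.filter (fun r => r != 0)
    let runs := if runs = [] then [0] else runs        -- `[...] or [0]`
    PySem.List.sorted runs (fun x => x) false

-- ===== PRECONDITION & SPEC =====
def Spec_parse_shading (shading : List Bool) (out : List Int) : Prop := out = parse_shading_alt shading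
instance (shading : List Bool) (out : List Int) : Decidable (Spec_parse_shading shading out) := by unfold Spec_parse_shading; infer_instance

-- ===== CLAIM (what is proved, stated in full; the proofs are below) =====
def Claim_equal_parse_shading : Prop := ∀ (shading : List Bool), Dom_parse_shading shading → Spec_parse_shading shading (parse_shading shading)

-- ===== LEMMAS AND PROOFS =====
-- generic: a fold whose step only appends to the first component can have the accumulator peeled off
theorem pvFoldAcc (step : List Int × Int → Bool → List Int × Int)
    (hstep : ∀ acc n b, step (acc, n) b = (acc ++ (step ([], n) b).1, (step ([], n) b).2)) :
    ∀ (l : List Bool) (acc : List Int) (n : Int),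
      l.foldl step (acc, n) = (acc ++ (l.foldl step ([], n)).1, (l.foldl step ([], n)).2) := by
  intro l
  induction l with
  | nil => intro acc n; simp
  | cons b l ih =>
    intro acc n
    simp only [List.foldl_cons]
    rw [hstep acc n b]
    rw [ih (acc ++ (step ([], n) b).1) ((step ([], n) b).2)]
    conv_rhs => rw [hstep [] n b]
    simp only [List.nil_append]
    rw [ih (step ([], n) b).1 ((step ([], n) b).2)]
    simp [List.append_assoc]

theorem pvStepAAcc : ∀ (acc : List Int) (n : Int) (b : Bool),
    stepA (acc, n) b = (acc ++ (stepA ([], n) b).1, (stepA ([], n) b).2) := by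
  intro acc n b
  cases b <;> simp [stepA] <;> split_ifs <;> simp

theorem pvStepBAcc : ∀ (acc : List Int) (n : Int) (b : Bool),
    stepB (acc, n) b = (acc ++ (stepB ([], n) b).1, (stepB ([], n) b).2) := by
  intro acc n b
  cases b <;> simp [stepB]

-- folding either step over an all-True list just increments the counter
theorem pvFoldTrues (step : List Int × Int → Bool → List Int × Int)
    (hstep : ∀ p : List Int × Int, step p true = (p.1, p.2 + 1)) :
    ∀ (t : List Bool), (∀ x ∈ t, x = true) → ∀ p : List Int × Int,
      t.foldl step p = (p.1, p.2 + (t.length : Int)) := by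
  intro t
  induction t with
  | nil => intro _ p; simp
  | cons b t ih =>
    intro ht p
    have hb : b = true := ht b (by simp)
    subst hb
    simp only [List.foldl_cons, hstep]
    rw [ih (fun x hx => ht x (by simp [hx]))]
    simp only [List.length_cons, Prod.mk.injEq]
    exact ⟨trivial, by push_cast; ring⟩

-- the positive entries of B's flush list are exactly A's flush list, with equal counters
theorem pvFoldBA : ∀ (l : List Bool) (n : Int), 0 ≤ n →
    (l.foldl stepB ([], n)).1.filter (fun r => r != 0) = (l.foldl stepA ([], n)).1 ∧
    (l.foldl stepB ([], n)).2 = (l.foldl stepA ([], n)).2 ∧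
    0 ≤ (l.foldl stepA ([], n)).2 := by
  intro l
  induction l with
  | nil => intro n hn; simp [hn]
  | cons b l ih =>
    intro n hn
    cases b with
    | true =>
      simp only [List.foldl_cons, stepA, stepB, if_true]
      exact ih (n + 1) (by omega)
    | false =>
      simp only [List.foldl_cons, stepA, stepB, if_false, Bool.false_eq_true, List.nil_append]
      obtain ⟨h1, h2, h3⟩ := ih 0 le_rfl
      by_cases h : n > 0
      · simp only [if_pos h]
        rw [pvFoldAcc stepB pvStepBAcc l [n] 0, pvFoldAcc stepA pvStepAAcc l [n] 0]
        refine ⟨?_, by simpa using h2, by simpa using h3⟩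
        simp only [List.filter_append]
        rw [h1]
        have hne : (n != 0) = true := by simp; omega
        simp [List.filter, hne]
      · simp only [if_neg h]
        have hn0 : n = 0 := by omega
        subst hn0
        rw [pvFoldAcc stepB pvStepBAcc l [0] 0]
        refine ⟨?_, by simpa using h2, h3⟩
        simp only [List.filter_append]
        rw [h1]
        simp [List.filter]

theorem pvSplitNotAll : ∀ (l : List Bool), ¬ (l.all (fun b => b) = true) →
    ∃ t f, l = t ++ false :: f ∧ ∀ x ∈ t, x = true := by
  intro l
  induction l with
  | nil => intro h; simp at h
  | cons b l ih =>
    intro h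
    cases b with
    | false => exact ⟨[], l, rfl, by simp⟩
    | true =>
      have h' : ¬ (l.all (fun b => b) = true) := by simpa using h
      obtain ⟨t, f, hl, ht⟩ := ih h'
      refine ⟨true :: t, f, by simp [hl], ?_⟩
      intro x hx
      rcases List.mem_cons.mp hx with hx1 | hx2
      · exact hx1
      · exact ht x hx2

theorem pvIndexSplit (t f : List Bool) (ht : ∀ x ∈ t, x = true) :
    PySem.List.index? (t ++ false :: f) false = some t.length := by
  rw [PySem.List.index?_eq_some_iff]
  exact ⟨t, f, rfl, rfl, fun hmem => by have := ht false hmem; simp at this⟩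

-- the shared tail: `[0]`-guard plus sort maps permuted lists to the same output
theorem pvGuardSorted (x y : List Int) (hp : x.Perm y) :
    PySem.List.sorted (if x = [] then [0] else x) (fun a => a) false
      = PySem.List.sorted (if y = [] then [0] else y) (fun a => a) false := by
  by_cases hx : x = []
  · have hy : y = [] := (hp.symm.trans (hx ▸ List.Perm.refl _)).eq_nil
    rw [hx, hy]
  · have hy : y ≠ [] := fun h => hx (hp.trans (h ▸ List.Perm.refl _)).eq_nil
    rw [if_neg hx, if_neg hy]
    exact PySem.List.sorted_eq_sorted_of_perm _ _ _ (fun a b h => h) hp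

theorem pvMainSplit (t f : List Bool) (ht : ∀ x ∈ t, x = true) :
    parse_shading (t ++ false :: f) = parse_shading_alt (t ++ false :: f) := by
  have hguard : ((t ++ false :: f).all fun b => b) = false := by
    simp [List.all_append]
  obtain ⟨h1, h2, h3⟩ := pvFoldBA f 0 le_rfl
  have hstepAt : ∀ p : List Int × Int, stepA p true = (p.1, p.2 + 1) := fun p => by simp [stepA]
  have hstepBt : ∀ p : List Int × Int, stepB p true = (p.1, p.2 + 1) := fun p => by simp [stepB]
  have hA : List.foldl stepA ([], 0) (false :: f ++ t)
      = ((List.foldl stepA ([], 0) f).1, (List.foldl stepA ([], 0) f).2 + (t.length : Int)) := by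
    simp only [List.foldl_cons, List.foldl_append]
    have h0 : stepA (([] : List Int), (0 : Int)) false = ([], 0) := by simp [stepA]
    rw [h0, pvFoldTrues stepA hstepAt t ht]
  have hB : List.foldl stepB ([], 0) (t ++ false :: f)
      = ((t.length : Int) :: (List.foldl stepB ([], 0) f).1, (List.foldl stepB ([], 0) f).2) := by
    rw [List.foldl_append, pvFoldTrues stepB hstepBt t ht ([], 0)]
    simp only [List.foldl_cons]
    have h0 : stepB (([] : List Int), (0 : Int) + (t.length : Int)) false = ([(t.length : Int)], 0) := by
      simp [stepB]
    rw [h0, pvFoldAcc stepB pvStepBAcc f [(t.length : Int)] 0]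
    simp
  unfold parse_shading parse_shading_alt
  rw [hguard]
  simp only [Bool.false_eq_true, if_false, pvIndexSplit t f ht,
    PySem.List.slice_from_natCast, PySem.List.slice_to_natCast,
    List.drop_left, List.take_left]
  rw [hA, hB]
  dsimp only
  rw [h2]
  apply pvGuardSorted
  rcases t with _ | ⟨b, t'⟩
  · -- no leading shaded cell: B does not merge; the lists are equal
    simp only [List.length_nil, Nat.cast_zero, add_zero, List.headD, Bool.and_false,
      Bool.false_eq_true, if_false]
    by_cases hm : (List.foldl stepA ([], 0) f).2 = 0
    · simp [hm, List.filter, h1]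
    · have hmne : ((List.foldl stepA ([], 0) f).2 != 0) = true := by simp [hm]
      have hmp : (0 : Int) < (List.foldl stepA ([], 0) f).2 := by omega
      simp [hm, hmp, hmne, List.filter_append, List.filter, h1]
  · have hb : b = true := ht b (by simp)
    subst hb
    have hkp : (0 : Int) < ((true :: t').length : Int) := by exact_mod_cast Nat.succ_pos t'.length
    simp only [List.cons_append, List.headD_cons, Bool.and_true]
    by_cases hm : (List.foldl stepA ([], 0) f).2 = 0
    · -- empty trailing run: B keeps the leading run in front, A flushes it at the end
      have hkne : ((((true :: t').length : Nat) : Int) != 0) = true := by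
        simp; omega
      simp only [hm, ne_eq, not_true_eq_false, decide_false, Bool.false_eq_true, if_false,
        zero_add, if_pos hkp, List.filter, hkne, h1]
      exact List.perm_append_singleton _ _
    · -- ring wrap: B merges the trailing run into the leading one
      have hmp : (0 : Int) < (List.foldl stepA ([], 0) f).2 := by omega
      have hsum : (0 : Int) < (List.foldl stepA ([], 0) f).2 + ((true :: t').length : Int) := by omega
      have hsumne : ((((((true :: t').length : Nat) : Int)) + (List.foldl stepA ([], 0) f).2) != 0) = true := by
        simp; omega
      simp only [ne_eq, hm, not_false_eq_true, decide_true, Bool.true_and, if_true,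
        if_pos hsum, List.filter, hsumne, h1]
      rw [add_comm ((((true :: t').length : Nat) : Int))]
      exact List.perm_append_singleton _ _

-- ===== VERDICT (by name: the statement is the Claim_ definition above) =====
theorem parse_shading_spec : Claim_equal_parse_shading := by
  intro shading _
  unfold Spec_parse_shading
  by_cases h : shading.all (fun b => b) = true
  · simp [parse_shading, parse_shading_alt, h]
  · obtain ⟨t, f, rfl, ht⟩ := pvSplitNotAll shading h
    exact pvMainSplit t f ht
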